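-- pv_equiv track=rewrite | github.com/Anilkumar-tech101/Workshop-projects | eulertasks.py | check_string_order_and_pv
-- ===== SOURCE A (Python) =====
-- def check_string_order_and_pv(s):
--     if len(s) < 2:
--         return "Not enough characters"
--
--     asc = True
--     strict_asc = True
--     desc = True
--     strict_desc = True
--
--     peak = False
--     valley = False
--
--     for i in range(len(s) - 1):
--         if s[i] > s[i + 1]:
--             asc = False
--             strict_asc = False
--         elif s[i] < s[i + 1]:
--             desc = False
--             strict_desc = False
--         else:
--             strict_asc = False
--             strict_desc = False
--
--     for i in range(1, len(s) - 1):
--         if s[i] > s[i - 1] and s[i] > s[i + 1]: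
--             peak = True
--         elif s[i] < s[i - 1] and s[i] < s[i + 1]:
--             valley = True
--
--
--     if strict_asc:
--         return "Strict Ascending"
--     if asc:
--         return "Ascending"
--     if strict_desc:
--         return "Strict Descending"
--     if desc:
--         return "Descending"
--     if peak and valley:
--         return "Peaks & Valleys"
--     if peak:
--         return "Peak pattern"
--     if valley:
--         return "Valley pattern"
--
--     return "Unordered"
-- ===== SOURCE B (Python) =====
-- def check_string_order_and_pv(s):
--     if len(s) < 2:
--         return "Not enough characters"
--     d = [(a < b) - (b < a) for a, b in zip(s, s[1:])]
--     strict_asc = all(x > 0 for x in d)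
--     asc = all(x >= 0 for x in d)
--     strict_desc = all(x < 0 for x in d)
--     desc = all(x <= 0 for x in d)
--     peak = any(x > 0 and y < 0 for x, y in zip(d, d[1:]))
--     valley = any(x < 0 and y > 0 for x, y in zip(d, d[1:]))
--     if strict_asc:
--         return "Strict Ascending"
--     if asc:
--         return "Ascending"
--     if strict_desc:
--         return "Strict Descending"
--     if desc:
--         return "Descending"
--     if peak and valley:
--         return "Peaks & Valleys"
--     if peak:
--         return "Peak pattern"
--     if valley:
--         return "Valley pattern"
--     return "Unordered"
-- ===== Notes on version B (the rewrite author's own statement) =====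
-- stated objective: idiomatic
-- what changed: B replaces A's two index loops with stateful boolean flags by a derived adjacent-pair sign list d and all()/any() predicates over d, detecting peaks/valleys as +/- sign transitions in d instead of comparing character triples.
import Mathlib
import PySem

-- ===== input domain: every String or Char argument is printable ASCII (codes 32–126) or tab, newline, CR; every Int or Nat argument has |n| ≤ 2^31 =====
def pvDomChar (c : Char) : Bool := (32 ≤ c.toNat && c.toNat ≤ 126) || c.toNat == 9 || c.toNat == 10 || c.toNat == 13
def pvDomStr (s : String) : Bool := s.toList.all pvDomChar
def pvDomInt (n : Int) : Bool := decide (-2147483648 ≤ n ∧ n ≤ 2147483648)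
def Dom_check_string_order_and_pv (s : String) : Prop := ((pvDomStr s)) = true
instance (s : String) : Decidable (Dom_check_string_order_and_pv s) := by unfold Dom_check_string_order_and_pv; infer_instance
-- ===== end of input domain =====

-- B replaces A's two stateful index loops by an adjacent-pair sign list with all/any predicates; same output ladder. Idiomatic, not faster.

-- ===== PORT A =====
-- first loop of A: walks adjacent pairs updating (asc, strict_asc, desc, strict_desc)
def aFlags : List Char → Bool × Bool × Bool × Bool → Bool × Bool × Bool × Bool
  | a :: b :: rest, (asc, sasc, desc, sdesc) =>
      if b < a then aFlags (b :: rest) (false, false, desc, sdesc)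
      else if a < b then aFlags (b :: rest) (asc, sasc, false, false)
      else aFlags (b :: rest) (asc, false, desc, false)
  | _, st => st

-- second loop of A: walks triples updating (peak, valley)
def aPV : List Char → Bool × Bool → Bool × Bool
  | a :: b :: c :: rest, (peak, valley) =>
      if a < b ∧ c < b then aPV (b :: c :: rest) (true, valley)
      else if b < a ∧ b < c then aPV (b :: c :: rest) (peak, true)
      else aPV (b :: c :: rest) (peak, valley)
  | _, st => st

def check_string_order_and_pv (s : String) : String :=
  let l := s.toList
  if l.length < 2 then "Not enough characters" else
  let f := aFlags l (true, true, true, true)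
  let pv := aPV l (false, false)
  if f.2.1 then "Strict Ascending"
  else if f.1 then "Ascending"
  else if f.2.2.2 then "Strict Descending"
  else if f.2.2.1 then "Descending"
  else if pv.1 && pv.2 then "Peaks & Valleys"
  else if pv.1 then "Peak pattern"
  else if pv.2 then "Valley pattern"
  else "Unordered"

-- ===== PORT B =====
-- sign of an adjacent pair: (a < b) - (b < a) in Python
def pvSign (a b : Char) : Int := (if a < b then 1 else 0) - (if b < a then 1 else 0)

def check_string_order_and_pv_alt (s : String) : String :=
  let l := s.toList
  if l.length < 2 then "Not enough characters" else
  let d := (l.zip l.tail).map (fun p => pvSign p.1 p.2)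
  let strict_asc := d.all (fun x => decide (x > 0))
  let asc := d.all (fun x => decide (x ≥ 0))
  let strict_desc := d.all (fun x => decide (x < 0))
  let desc := d.all (fun x => decide (x ≤ 0))
  let trans := d.zip d.tail
  let peak := trans.any (fun p => decide (p.1 > 0) && decide (p.2 < 0))
  let valley := trans.any (fun p => decide (p.1 < 0) && decide (p.2 > 0))
  if strict_asc then "Strict Ascending"
  else if asc then "Ascending"
  else if strict_desc then "Strict Descending"
  else if desc then "Descending"
  else if peak && valley then "Peaks & Valleys"
  else if peak then "Peak pattern"
  else if valley then "Valley pattern"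
  else "Unordered"

-- ===== PRECONDITION & SPEC =====
def Spec_check_string_order_and_pv (s : String) (out : String) : Prop := out = check_string_order_and_pv_alt s
instance (s : String) (out : String) : Decidable (Spec_check_string_order_and_pv s out) := by unfold Spec_check_string_order_and_pv; infer_instance

-- ===== CLAIM (what is proved, stated in full; the proofs are below) =====
def Claim_equal_check_string_order_and_pv : Prop := ∀ (s : String), Dom_check_string_order_and_pv s → Spec_check_string_order_and_pv s (check_string_order_and_pv s)

-- ===== LEMMAS AND PROOFS =====

-- invariant of A's first loop, stated against B's pair-wise predicates
lemma aFlags_eq (l : List Char) : ∀ a sa de sd, aFlags l (a, sa, de, sd) =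
    (a && (l.zip l.tail).all (fun p => !decide (p.2 < p.1)),
     sa && (l.zip l.tail).all (fun p => decide (p.1 < p.2)),
     de && (l.zip l.tail).all (fun p => !decide (p.1 < p.2)),
     sd && (l.zip l.tail).all (fun p => decide (p.2 < p.1))) := by
  induction l with
  | nil => intro a sa de sd; simp [aFlags]
  | cons x t ih =>
    cases t with
    | nil => intro a sa de sd; simp [aFlags]
    | cons y t2 =>
      intro a sa de sd
      by_cases h1 : y < x
      · have h2 : ¬ x < y := lt_asymm h1
        simp [aFlags, h1, h2, ih]
      · by_cases h2 : x < y
        · simp [aFlags, h1, h2, ih]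
        · simp [aFlags, h1, h2, ih]

-- invariant of A's second loop
lemma aPV_eq (l : List Char) : ∀ p v, aPV l (p, v) =
    (p || (l.zip (l.tail.zip l.tail.tail)).any (fun q => decide (q.1 < q.2.1) && decide (q.2.2 < q.2.1)),
     v || (l.zip (l.tail.zip l.tail.tail)).any (fun q => decide (q.2.1 < q.1) && decide (q.2.1 < q.2.2))) := by
  induction l with
  | nil => intro p v; simp [aPV]
  | cons x t ih =>
    cases t with
    | nil => intro p v; simp [aPV]
    | cons y t2 =>
      cases t2 with
      | nil => intro p v; simp [aPV]
      | cons z t3 =>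
        intro p v
        by_cases h1 : x < y ∧ z < y
        · have hh2 : (decide (y < x) && decide (y < z)) = false := by
            simp [lt_asymm h1.1]
          simp [aPV, h1, ih, hh2]
        · by_cases h2 : y < x ∧ y < z
          · have hh1 : (decide (x < y) && decide (z < y)) = false := by
              simp [lt_asymm h2.1]
            simp [aPV, h1, h2, ih, hh1]
          · have hh1 : (decide (x < y) && decide (z < y)) = false := by
              rcases Decidable.not_and_iff_not_or_not.mp h1 with h | h <;> simp [h]
            have hh2 : (decide (y < x) && decide (y < z)) = false := by
              rcases Decidable.not_and_iff_not_or_not.mp h2 with h | h <;> simp [h]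
            simp [aPV, if_neg h1, if_neg h2, ih, hh1, hh2]

-- pointwise bridges between sign values and character comparisons
lemma pvSign_pos (a b : Char) : decide (pvSign a b > 0) = decide (a < b) := by
  unfold pvSign
  by_cases h1 : a < b
  · simp [h1, lt_asymm h1]
  · by_cases h2 : b < a <;> simp [h1, h2]

lemma pvSign_neg (a b : Char) : decide (pvSign a b < 0) = decide (b < a) := by
  unfold pvSign
  by_cases h1 : a < b
  · simp [h1, lt_asymm h1]
  · by_cases h2 : b < a <;> simp [h1, h2]

lemma pvSign_nonneg (a b : Char) : decide (pvSign a b ≥ 0) = !decide (b < a) := by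
  unfold pvSign
  by_cases h1 : a < b
  · simp [h1, lt_asymm h1]
  · by_cases h2 : b < a <;> simp [h1, h2]

lemma pvSign_nonpos (a b : Char) : decide (pvSign a b ≤ 0) = !decide (a < b) := by
  unfold pvSign
  by_cases h1 : a < b
  · simp [h1, lt_asymm h1]
  · by_cases h2 : b < a <;> simp [h1, h2]

-- B's sign-transition scan equals A's triple scan
lemma trans_eq (l : List Char)
    (f : Int → Int → Bool) (g : Char → Char → Char → Bool)
    (hfg : ∀ a b c, f (pvSign a b) (pvSign b c) = g a b c) :
    (((l.zip l.tail).map (fun p => pvSign p.1 p.2)).zip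
      (((l.zip l.tail).map (fun p => pvSign p.1 p.2)).tail)).any (fun p => f p.1 p.2)
    = (l.zip (l.tail.zip l.tail.tail)).any (fun q => g q.1 q.2.1 q.2.2) := by
  induction l with
  | nil => simp
  | cons x t ih =>
    cases t with
    | nil => simp
    | cons y t2 =>
      cases t2 with
      | nil => simp
      | cons z t3 =>
        simp only [List.tail_cons, List.zip_cons_cons, List.map_cons, List.any_cons] at ih ⊢
        rw [hfg, ih]

-- ===== VERDICT (by name: the statement is the Claim_ definition above) =====
theorem check_string_order_and_pv_spec : Claim_equal_check_string_order_and_pv := by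
  intro s _
  unfold Spec_check_string_order_and_pv check_string_order_and_pv check_string_order_and_pv_alt
  simp only []
  by_cases hlen : s.toList.length < 2
  · simp only [if_pos hlen]
  · simp only [if_neg hlen]
    rw [aFlags_eq, aPV_eq]
    rw [trans_eq s.toList (fun x y => decide (x > 0) && decide (y < 0))
      (fun a b c => decide (a < b) && decide (c < b)) (fun a b c => by simp [pvSign_pos, pvSign_neg])]
    rw [trans_eq s.toList (fun x y => decide (x < 0) && decide (y > 0))
      (fun a b c => decide (b < a) && decide (b < c)) (fun a b c => by simp [pvSign_neg, pvSign_pos])]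
    simp only [List.all_map, Function.comp_def, Bool.true_and, Bool.false_or, pvSign_pos,
      pvSign_neg, pvSign_nonneg, pvSign_nonpos]
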